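-- pv_equiv track=rewrite | github.com/OscarCN/KG | src/entities/linking/run_linking.py | _find_record_start
-- ===== SOURCE A (Python) =====
-- def _find_record_start(data: str, end_idx: int) -> int | None:
--     in_str = False
--     depth = 1
--     i = end_idx - 1
--     while i >= 0:
--         c = data[i]
--         if c == '"':
--             bs = 0
--             j = i - 1
--             while j >= 0 and data[j] == "\\":
--                 bs += 1
--                 j -= 1
--             if bs % 2 == 0:
--                 in_str = not in_str
--         elif not in_str:
--             if c == "}":
--                 depth += 1
--             elif c == "{":
--                 depth -= 1
--                 if depth == 0:
--                     return i
--         i -= 1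
--     return None
-- ===== SOURCE B (Python) =====
-- def _find_record_start(data: str, end_idx: int) -> int | None:
--     # Pass 1: collect the positions of unescaped quotes in data[:end_idx].
--     quotes = []
--     run = 0
--     for i in range(end_idx):
--         c = data[i]
--         if c == '"' and run % 2 == 0:
--             quotes.append(i)
--         run = run + 1 if c == '\\' else 0
--     # Pair the quotes from the right: the stretches of the prefix lying
--     # outside string literals, rightmost stretch first.
--     segments = []
--     hi = end_idx
--     while len(quotes) >= 2:
--         segments.append((quotes.pop() + 1, hi))
--         hi = quotes.pop()
--     if quotes:
--         segments.append((quotes[0] + 1, hi))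
--     else:
--         segments.append((0, hi))
--     # Scan the stretches right to left for the '{' not matched by a '}'.
--     depth = 1
--     for lo, hi in segments:
--         for i in range(hi - 1, lo - 1, -1):
--             c = data[i]
--             if c == '}':
--                 depth += 1
--             elif c == '{':
--                 depth -= 1
--                 if depth == 0:
--                     return i
--     return None
-- ===== Notes on version B (the rewrite author's own statement) =====
-- stated objective: alternative
-- what changed: A scans backward with a depth counter, re-counting the preceding backslashes at every quote it meets; B first collects the unescaped-quote positions in one forward pass (incremental backslash run), pairs them from the right into the stretches lying outside string literals, and then scans only those stretches right-to-left for the unmatched '{'. Pre_ excludes exactly the inputs where both programs raise IndexError (end_idx exceeding len(data)).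
import Mathlib
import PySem

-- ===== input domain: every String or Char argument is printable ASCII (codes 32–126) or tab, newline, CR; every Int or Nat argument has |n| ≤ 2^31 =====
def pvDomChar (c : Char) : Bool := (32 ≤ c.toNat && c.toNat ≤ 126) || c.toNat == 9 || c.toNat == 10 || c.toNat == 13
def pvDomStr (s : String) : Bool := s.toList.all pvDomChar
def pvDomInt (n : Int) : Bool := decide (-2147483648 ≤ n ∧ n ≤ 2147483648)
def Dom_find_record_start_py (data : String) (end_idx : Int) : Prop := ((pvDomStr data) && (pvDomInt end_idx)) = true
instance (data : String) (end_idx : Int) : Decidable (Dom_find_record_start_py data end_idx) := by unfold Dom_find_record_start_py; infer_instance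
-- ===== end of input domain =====

-- B replaces A's single backward scan (which re-counts the preceding backslashes at every
-- quote) by: a forward pass collecting unescaped-quote positions, pairing them from the
-- right into the stretches outside string literals, and scanning only those stretches
-- right-to-left for the unmatched '{'; objective: alternative.

-- ===== PORT A =====
-- inner `while j >= 0 and data[j] == "\\"` loop: counts the backslashes ending at j
def aCountBs (l : List Char) (j : Int) (bs : Nat) : Nat :=
  if h : 0 ≤ j ∧ PySem.List.pyGet? l j = some '\\' then
    aCountBs l (j - 1) (bs + 1)
  else bs
termination_by (j + 1).toNat
decreasing_by obtain ⟨h1, -⟩ := h; omega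

-- the `while i >= 0` loop of A; `none` in the pyGet? none-case is the IndexError (outside Pre_)
def aLoop (l : List Char) (i : Int) (in_str : Bool) (depth : Int) : Option Int :=
  if h0 : 0 ≤ i then
    match PySem.List.pyGet? l i with
    | none => none
    | some c =>
      if c = '"' then
        let bs := aCountBs l (i - 1) 0
        aLoop l (i - 1) (if bs % 2 = 0 then !in_str else in_str) depth
      else if in_str = false then
        if c = '}' then aLoop l (i - 1) in_str (depth + 1)
        else if c = '{' then
          (if depth - 1 = 0 then some i else aLoop l (i - 1) in_str (depth - 1))
        else aLoop l (i - 1) in_str depth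
      else aLoop l (i - 1) in_str depth
  else none
termination_by (i + 1).toNat
decreasing_by all_goals omega

def find_record_start_py (data : String) (end_idx : Int) : Option Int :=
  aLoop data.toList (end_idx - 1) false 1

-- ===== PORT B =====
-- pass 1 body: `if c == '"' and run % 2 == 0: quotes.append(i)` then the run update;
-- none = IndexError
def bStepQ (l : List Char) (st : Option (Int × List Int)) (i : Int) :
    Option (Int × List Int) :=
  match st with
  | none => none
  | some (run, quotes) =>
    match PySem.List.pyGet? l i with
    | none => none
    | some c =>
      let quotes := if c = '"' ∧ PySem.Int.mod run 2 = 0 then quotes ++ [i] else quotes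
      some ((if c = '\\' then run + 1 else 0), quotes)

-- the `while len(quotes) >= 2` pairing loop plus the trailing if/else, transcribed as
-- recursion over the REVERSED quote list (python pops from the end)
def bSegsRev : List Int → Int → List (Int × Int)
  | [], hi => [(0, hi)]
  | [q], hi => [(q + 1, hi)]
  | qc :: qo :: rest, hi => (qc + 1, hi) :: bSegsRev rest qo

-- inner `for i in range(hi - 1, lo - 1, -1)` loop over one stretch;
-- inl = the `return i`, inr = the stretch is exhausted with this depth
def bScanSeg (l : List Char) (lo : Int) (i : Int) (depth : Int) : Option (Int ⊕ Int) :=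
  if h : lo ≤ i then
    match PySem.List.pyGet? l i with
    | none => none
    | some c =>
      if c = '}' then bScanSeg l lo (i - 1) (depth + 1)
      else if c = '{' then
        (if depth - 1 = 0 then some (Sum.inl i) else bScanSeg l lo (i - 1) (depth - 1))
      else bScanSeg l lo (i - 1) depth
  else some (Sum.inr depth)
termination_by (i - lo + 1).toNat
decreasing_by all_goals omega

-- the outer `for lo, hi in segments` loop with the final `return None`
def bScanSegs (l : List Char) : List (Int × Int) → Int → Option Int
  | [], _ => none
  | (lo, hi) :: rest, depth =>
    match bScanSeg l lo (hi - 1) depth with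
    | none => none
    | some (Sum.inl i) => some i
    | some (Sum.inr d) => bScanSegs l rest d

def find_record_start_py_alt (data : String) (end_idx : Int) : Option Int :=
  match (PySem.List.pyRange 0 end_idx 1).foldl (bStepQ data.toList) (some (0, [])) with
  | none => none
  | some (_, quotes) => bScanSegs data.toList (bSegsRev quotes.reverse end_idx) 1

-- ===== PRECONDITION & SPEC =====
-- Pre_ excludes exactly the inputs on which the Python A (and B) raises IndexError:
-- end_idx exceeding the length of data.
def Pre_find_record_start_py (data : String) (end_idx : Int) : Prop :=
  end_idx ≤ (data.toList.length : Int)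
instance (data : String) (end_idx : Int) : Decidable (Pre_find_record_start_py data end_idx) := by
  unfold Pre_find_record_start_py; infer_instance

def pvWitness_find_record_start_py : String × Int := ("x{\"a\": 1}", 9)

def Spec_find_record_start_py (data : String) (end_idx : Int) (out : Option Int) : Prop :=
  out = find_record_start_py_alt data end_idx
instance (data : String) (end_idx : Int) (out : Option Int) :
    Decidable (Spec_find_record_start_py data end_idx out) := by
  unfold Spec_find_record_start_py; infer_instance

-- ===== CLAIM (what is proved, stated in full; the proofs are below) =====
def Claim_equal_find_record_start_py : Prop :=
  ∀ (data : String) (end_idx : Int), Dom_find_record_start_py data end_idx →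
    Pre_find_record_start_py data end_idx →
    Spec_find_record_start_py data end_idx (find_record_start_py data end_idx)

-- ===== LEMMAS AND PROOFS =====

-- forward consecutive-backslash run ending just before index i
def runF (l : List Char) : Nat → Nat
  | 0 => 0
  | i + 1 => if l[i]? = some '\\' then runF l i + 1 else 0

-- `i` is an unescaped quote
def uqb (l : List Char) (i : Nat) : Bool :=
  (l[i]? == some '"') && decide (runF l i % 2 = 0)

-- the unescaped-quote positions below n, increasing
def quotesL (l : List Char) (n : Nat) : List Nat :=
  (List.range n).filter (uqb l)

-- A's loop result fed through one stretch-scan: the continuation used by the lemmas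
def contA (l : List Char) (lo : Int) (r : Option (Int ⊕ Int)) : Option Int :=
  match r with
  | none => none
  | some (Sum.inl i) => some i
  | some (Sum.inr d) => aLoop l (lo - 1) false d

theorem pymod_two (x : Int) : (PySem.Int.mod x 2 = 0) = (x % 2 = 0) := by
  unfold PySem.Int.mod; rw [Int.fmod_eq_emod]; simp

theorem countBs_eq_runF (l : List Char) (i : Nat) (hi : i ≤ l.length) (acc : Nat) :
    aCountBs l ((i : Int) - 1) acc = runF l i + acc := by
  induction i generalizing acc with
  | zero =>
    rw [aCountBs, dif_neg (by rintro ⟨h1, -⟩; omega)]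
    simp [runF]
  | succ i ih =>
    have hi' : i < l.length := by omega
    have hc : ((i : Int) + 1 - 1) = (i : Int) := by ring
    rw [aCountBs]
    push_cast
    rw [hc]
    by_cases hbs : l[i] = '\\'
    · rw [dif_pos ⟨by omega, by simp [PySem.List.pyGet?_natCast, List.getElem?_eq_getElem hi', hbs]⟩]
      rw [ih (by omega)]
      simp [runF, List.getElem?_eq_getElem hi', hbs]
      omega
    · rw [dif_neg (by
        rintro ⟨-, h2⟩
        rw [PySem.List.pyGet?_natCast, List.getElem?_eq_getElem hi'] at h2
        exact hbs (by simpa using h2))]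
      simp [runF, List.getElem?_eq_getElem hi', hbs]

theorem aLoop_neg (l : List Char) (i : Int) (s : Bool) (d : Int) (h : i < 0) :
    aLoop l i s d = none := by
  rw [aLoop, dif_neg (by omega)]

-- toggling at an unescaped quote
theorem aLoop_uq (l : List Char) (q : Nat) (hq : q < l.length) (huq : uqb l q = true)
    (s : Bool) (d : Int) : aLoop l (q : Int) s d = aLoop l ((q : Int) - 1) (!s) d := by
  obtain ⟨h1, h2⟩ := by simpa [uqb] using huq
  rw [aLoop, dif_pos (by omega), PySem.List.pyGet?_natCast, h1]
  rw [countBs_eq_runF l q (by omega) 0]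
  simp [h2]

-- pass 1 computes (runF, quotesL)
theorem foldl_pass1 (l : List Char) (n : Nat) (hn : n ≤ l.length) :
    (PySem.List.pyRange 0 (n : Int) 1).foldl (bStepQ l) (some (0, [])) =
      some ((runF l n : Int), (quotesL l n).map (fun i => (i : Int))) := by
  induction n with
  | zero => simp [PySem.List.pyRange_one_eq_nil, runF, quotesL]
  | succ n ih =>
    have hn' : n < l.length := by omega
    have hr : PySem.List.pyRange 0 ((n : Nat) + 1 : Int) 1 =
        PySem.List.pyRange 0 (n : Int) 1 ++ [(n : Int)] :=
      PySem.List.pyRange_one_succ_right (by omega)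
    push_cast
    rw [hr, List.foldl_append, ih (by omega), List.foldl_cons, List.foldl_nil]
    simp only [bStepQ, PySem.List.pyGet?_natCast, List.getElem?_eq_getElem hn']
    have hq : quotesL l (n + 1) = quotesL l n ++ if uqb l n then [n] else [] := by
      rw [quotesL, List.range_succ, List.filter_append]
      cases h : uqb l n <;> simp [quotesL, List.filter, h]
    have hmod : (PySem.Int.mod ((runF l n : Nat) : Int) 2 = 0) ↔ (runF l n % 2 = 0) := by
      rw [pymod_two]; constructor <;> intro h <;> omega
    by_cases hc : l[n] = '"'
    · have hns : ¬ (l[n] = '\\') := by rw [hc]; decide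
      by_cases hp : runF l n % 2 = 0
      · simp [hc, hmod, hp, hq, uqb, List.getElem?_eq_getElem hn', runF, hns]
        try omega
      · simp [hc, hmod, hp, hq, uqb, List.getElem?_eq_getElem hn', runF, hns]
        try omega
    · have huq : uqb l n = false := by
        simp [uqb, List.getElem?_eq_getElem hn', hc]
      by_cases hbs : l[n] = '\\'
      · simp [hc, hq, huq, runF, List.getElem?_eq_getElem hn', hbs, hmod]
        try push_cast
        try ring
      · simp [hc, hq, huq, runF, List.getElem?_eq_getElem hn', hbs, hmod]

-- a stretch [lo, lo+k) with no unescaped quote: A's loop = B's stretch scan + continuation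
theorem loop_stretch (l : List Char) (lo k : Nat) (d : Int)
    (hk : lo + k ≤ l.length)
    (hnq : ∀ j, lo ≤ j → j < lo + k → uqb l j = false) :
    aLoop l (((lo + k : Nat) : Int) - 1) false d = contA l (lo : Int) (bScanSeg l (lo : Int) (((lo + k : Nat) : Int) - 1) d) := by
  induction k generalizing d with
  | zero =>
    rw [bScanSeg, dif_neg (by omega)]
    rfl
  | succ k ih =>
    have hj : lo + k < l.length := by omega
    have hcst : (((lo + (k + 1) : Nat) : Int) - 1) = ((lo + k : Nat) : Int) := by push_cast; ring
    rw [hcst, aLoop, dif_pos (by omega), bScanSeg, dif_pos (by push_cast; omega),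
      PySem.List.pyGet?_natCast, List.getElem?_eq_getElem hj]
    have huq : uqb l (lo + k) = false := hnq (lo + k) (by omega) (by omega)
    have ih' : ∀ d', aLoop l (((lo + k : Nat) : Int) - 1) false d' =
        contA l (lo : Int) (bScanSeg l (lo : Int) (((lo + k : Nat) : Int) - 1) d') :=
      fun d' => ih d' (by omega) (fun j h1 h2 => hnq j h1 (by omega))
    by_cases hc : l[lo + k] = '"'
    · have hodd : ¬ (runF l (lo + k) % 2 = 0) := by
        simpa [uqb, List.getElem?_eq_getElem hj, hc] using huq
      simp only [hc, if_pos rfl, countBs_eq_runF l (lo + k) (by omega) 0, Nat.add_zero,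
        if_neg hodd, if_neg (show ¬('"' = '}') by decide), if_neg (show ¬('"' = '{') by decide)]
      exact ih' d
    · by_cases hcb : l[lo + k] = '}'
      · simp only [if_neg hc, if_pos (show (false : Bool) = false from rfl), hcb, if_pos rfl]
        exact ih' (d + 1)
      · by_cases hob : l[lo + k] = '{'
        · by_cases hd : d - 1 = 0
          · simp only [if_neg hc, if_pos (show (false : Bool) = false from rfl), if_neg hcb,
              hob, if_pos rfl, if_pos hd]
            rfl
          · simp only [if_neg hc, if_pos (show (false : Bool) = false from rfl), if_neg hcb,
              hob, if_pos rfl, if_neg hd]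
            exact ih' (d - 1)
        · simp only [if_neg hc, if_pos (show (false : Bool) = false from rfl), if_neg hcb,
            if_neg hob]
          exact ih' d

-- inside a string with no unescaped quote in [a, a+k): A skips the stretch
theorem loop_skip (l : List Char) (a k : Nat) (d : Int)
    (hk : a + k ≤ l.length)
    (hnq : ∀ j, a ≤ j → j < a + k → uqb l j = false) :
    aLoop l (((a + k : Nat) : Int) - 1) true d = aLoop l ((a : Int) - 1) true d := by
  induction k with
  | zero => rfl
  | succ k ih =>
    have hj : a + k < l.length := by omega
    have hcst : (((a + (k + 1) : Nat) : Int) - 1) = ((a + k : Nat) : Int) := by push_cast; ring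
    rw [hcst, aLoop, dif_pos (by omega), PySem.List.pyGet?_natCast,
      List.getElem?_eq_getElem hj]
    have huq : uqb l (a + k) = false := hnq (a + k) (by omega) (by omega)
    by_cases hc : l[a + k] = '"'
    · have hodd : ¬ (runF l (a + k) % 2 = 0) := by
        simpa [uqb, List.getElem?_eq_getElem hj, hc] using huq
      rw [countBs_eq_runF l (a + k) (by omega) 0]
      simp only [hc, if_pos rfl, Nat.add_zero, if_neg hodd]
      exact ih (by omega) (fun j h1 h2 => hnq j h1 (by omega))
    · simp only [if_neg hc, if_neg (show ¬(true = false) by simp)]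
      exact ih (by omega) (fun j h1 h2 => hnq j h1 (by omega))

-- the quote list below hi splits at its greatest element
theorem quotesL_split (l : List Char) (q hi : Nat) (hq : uqb l q = true) (hlt : q < hi)
    (hnq : ∀ j, q < j → j < hi → uqb l j = false) :
    quotesL l hi = quotesL l q ++ [q] := by
  have h1 : hi = (q + 1) + (hi - (q + 1)) := by omega
  rw [quotesL, h1, List.range_add, List.filter_append, List.range_succ, List.filter_append]
  have h2 : List.filter (uqb l) (List.map (fun x => (q + 1) + x) (List.range (hi - (q + 1)))) = [] := by
    rw [List.filter_eq_nil_iff]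
    intro a ha
    simp only [List.mem_map, List.mem_range] at ha
    obtain ⟨x, hx, rfl⟩ := ha
    simp [hnq (q + 1 + x) (by omega) (by omega)]
  rw [h2]
  simp [quotesL, List.filter, hq]

-- main: A's loop below hi equals B's scan over the stretches built from the quotes below hi
theorem main_lemma (l : List Char) : ∀ (hi : Nat), hi ≤ l.length → ∀ d : Int,
    aLoop l ((hi : Int) - 1) false d =
      bScanSegs l (bSegsRev (((quotesL l hi).map (fun i => (i : Int))).reverse) (hi : Int)) d := by
  intro hi
  induction hi using Nat.strong_induction_on with
  | _ hi IH =>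
    intro hhi d
    by_cases hex : ∃ q, q < hi ∧ uqb l q = true
    · obtain ⟨q0, hq0lt, hq0⟩ := hex
      set qc := Nat.findGreatest (fun q => uqb l q = true) (hi - 1) with hqcdef
      have hqcP : uqb l qc = true := Nat.findGreatest_spec (P := fun q => uqb l q = true) (by omega : q0 ≤ hi - 1) hq0
      have hqcle : qc ≤ hi - 1 := Nat.findGreatest_le (hi - 1)
      have hqclt : qc < hi := by omega
      have hnq1 : ∀ j, qc < j → j < hi → uqb l j = false := by
        intro j h1 h2
        have := Nat.findGreatest_is_greatest (P := fun q => uqb l q = true) h1 (by omega)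
        simpa using this
      have hsplit := quotesL_split l qc hi hqcP hqclt hnq1
      have hstr := loop_stretch l (qc + 1) (hi - qc - 1) d (by omega)
        (fun j h1 h2 => hnq1 j (by omega) (by omega))
      rw [show (qc + 1) + (hi - qc - 1) = hi from by omega] at hstr
      rw [hstr, hsplit]
      rw [show (List.map (fun i => (i : Int)) (quotesL l qc ++ [qc])).reverse
            = (qc : Int) :: (List.map (fun i => (i : Int)) (quotesL l qc)).reverse from by simp]
      have hc1 : ((qc + 1 : Nat) : Int) = (qc : Int) + 1 := by push_cast; ring
      rw [hc1]
      by_cases hex2 : ∃ q, q < qc ∧ uqb l q = true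
      · obtain ⟨q1, hq1lt, hq1⟩ := hex2
        set qo := Nat.findGreatest (fun q => uqb l q = true) (qc - 1) with hqodef
        have hqoP : uqb l qo = true := Nat.findGreatest_spec (P := fun q => uqb l q = true) (by omega : q1 ≤ qc - 1) hq1
        have hqole : qo ≤ qc - 1 := Nat.findGreatest_le (qc - 1)
        have hqolt : qo < qc := by omega
        have hnq2 : ∀ j, qo < j → j < qc → uqb l j = false := by
          intro j h1 h2
          have := Nat.findGreatest_is_greatest (P := fun q => uqb l q = true) h1 (by omega)
          simpa using this
        have hsplit2 := quotesL_split l qo qc hqoP hqolt hnq2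
        rw [hsplit2]
        rw [show (List.map (fun i => (i : Int)) (quotesL l qo ++ [qo])).reverse
              = (qo : Int) :: (List.map (fun i => (i : Int)) (quotesL l qo)).reverse from by simp]
        rw [bSegsRev]
        rcases hres : bScanSeg l ((qc : Int) + 1) ((hi : Int) - 1) d with _ | i | d'
        · simp [contA, bScanSegs, hres]
        · simp [contA, bScanSegs, hres]
        · rw [bScanSegs, hres]
          simp only [contA]
          rw [show ((qc : Int) + 1 - 1) = (qc : Int) from by ring]
          rw [aLoop_uq l qc (by omega) hqcP false d']
          simp only [Bool.not_false]
          have hskip := loop_skip l (qo + 1) (qc - qo - 1) d' (by omega)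
            (fun j h1 h2 => hnq2 j (by omega) (by omega))
          rw [show (qo + 1) + (qc - qo - 1) = qc from by omega] at hskip
          rw [hskip, show (((qo + 1 : Nat) : Int) - 1) = (qo : Int) from by push_cast; ring]
          rw [aLoop_uq l qo (by omega) hqoP true d']
          simp only [Bool.not_true]
          exact IH qo (by omega) (by omega) d'
      · have hq0' : quotesL l qc = [] := by
          rw [quotesL, List.filter_eq_nil_iff]
          intro a ha
          simp only [List.mem_range] at ha
          intro hcon
          exact hex2 ⟨a, ha, by simpa using hcon⟩
        rw [hq0']
        rw [show (List.map (fun i => (i : Int)) ([] : List Nat)).reverse = ([] : List Int) from by simp]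
        rw [show bSegsRev [(qc : Int)] ((hi : Nat) : Int) = [((qc : Int) + 1, ((hi : Nat) : Int))] from rfl]
        rcases hres : bScanSeg l ((qc : Int) + 1) ((hi : Int) - 1) d with _ | i | d'
        · simp [contA, bScanSegs, hres]
        · simp [contA, bScanSegs, hres]
        · rw [bScanSegs, hres]
          simp only [contA]
          rw [show ((qc : Int) + 1 - 1) = (qc : Int) from by ring]
          rw [aLoop_uq l qc (by omega) hqcP false d']
          simp only [Bool.not_false]
          have hskip := loop_skip l 0 qc d' (by omega)
            (fun j h1 h2 => by
              by_contra hcon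
              exact hex2 ⟨j, by omega, by simpa using hcon⟩)
          rw [show (0 + qc) = qc from by omega] at hskip
          rw [hskip, aLoop_neg l _ _ _ (by omega)]
          rfl
    · have hq0' : quotesL l hi = [] := by
        rw [quotesL, List.filter_eq_nil_iff]
        intro a ha
        simp only [List.mem_range] at ha
        intro hcon
        exact hex ⟨a, ha, by simpa using hcon⟩
      rw [hq0']
      rw [show (List.map (fun i => (i : Int)) ([] : List Nat)).reverse = ([] : List Int) from by simp]
      rw [show bSegsRev [] ((hi : Nat) : Int) = [(0, ((hi : Nat) : Int))] from rfl]
      have hstr := loop_stretch l 0 hi d (by omega)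
        (fun j h1 h2 => by
          by_contra hcon
          exact hex ⟨j, by omega, by simpa using hcon⟩)
      rw [show (0 + hi) = hi from by omega] at hstr
      rw [hstr]
      rcases hres : bScanSeg l (0 : Int) ((hi : Int) - 1) d with _ | i | d'
      · simp [contA, bScanSegs, hres]
      · simp [contA, bScanSegs, hres]
      · rw [bScanSegs, hres]
        simp only [contA]
        rw [aLoop_neg l _ _ _ (by omega)]
        rfl

-- ===== VERDICT (by name: the statement is the Claim_ definition above) =====
theorem find_record_start_py_spec : Claim_equal_find_record_start_py := by
  intro data end_idx _hDom hPre
  unfold Spec_find_record_start_py find_record_start_py find_record_start_py_alt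
  unfold Pre_find_record_start_py at hPre
  set l := data.toList with hl
  by_cases h0 : end_idx ≤ 0
  · rw [aLoop_neg _ _ _ _ (by omega)]
    rw [PySem.List.pyRange_one_eq_nil h0]
    simp only [List.foldl_nil, List.reverse_nil, bSegsRev, bScanSegs]
    rw [bScanSeg, dif_neg (by omega)]
  · push_neg at h0
    set n := end_idx.toNat with hn
    have hcast : (n : Int) = end_idx := by omega
    have hnl : n ≤ l.length := by omega
    rw [← hcast, foldl_pass1 l n hnl]
    simp only []
    rw [← main_lemma l n hnl 1]
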